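-- pv_equiv track=rewrite | github.com/kelvinhuang0327/number-pattern-research | tools/verify_gum_claim.py | cold_number_predict_2bets
-- ===== SOURCE A (Python) =====
-- from collections import Counter
--
-- def cold_number_predict_2bets(history, window=50):
--     """
--     冷號互補策略（對照組）
--     """
--     recent = history[-window:]
--     all_nums = [n for d in recent for n in d['numbers']]
--     freq = Counter(all_nums)
--     sorted_cold = sorted(range(1, 39), key=lambda x: freq.get(x, 0))
--
--     bet1 = sorted(sorted_cold[:6])
--     bet2 = sorted(sorted_cold[6:12])
--     return [bet1, bet2]
-- ===== SOURCE B (Python) =====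
-- def cold_number_predict_2bets(history, window=50):
--     """Counting-sort variant: bucket 1..38 by frequency instead of comparison-sorting."""
--     recent = history[-window:]
--     freq = {}
--     for d in recent:
--         for n in d['numbers']:
--             freq[n] = freq.get(n, 0) + 1
--     pairs = [(freq.get(n, 0), n) for n in range(1, 39)]
--     buckets = {}
--     for f, n in pairs:
--         buckets[f] = buckets.get(f, []) + [n]
--     cold = []
--     for f in sorted(buckets):
--         cold += buckets[f]
--     return [sorted(cold[:6]), sorted(cold[6:12])]
-- ===== Notes on version B (the rewrite author's own statement) =====
-- stated objective: alternative
-- what changed: Replaces A's Counter + comparison sort of 1..38 keyed by frequency with a hand-built frequency dict and a counting-sort: numbers are bucketed by frequency and the buckets concatenated in ascending frequency order.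
import Mathlib
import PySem

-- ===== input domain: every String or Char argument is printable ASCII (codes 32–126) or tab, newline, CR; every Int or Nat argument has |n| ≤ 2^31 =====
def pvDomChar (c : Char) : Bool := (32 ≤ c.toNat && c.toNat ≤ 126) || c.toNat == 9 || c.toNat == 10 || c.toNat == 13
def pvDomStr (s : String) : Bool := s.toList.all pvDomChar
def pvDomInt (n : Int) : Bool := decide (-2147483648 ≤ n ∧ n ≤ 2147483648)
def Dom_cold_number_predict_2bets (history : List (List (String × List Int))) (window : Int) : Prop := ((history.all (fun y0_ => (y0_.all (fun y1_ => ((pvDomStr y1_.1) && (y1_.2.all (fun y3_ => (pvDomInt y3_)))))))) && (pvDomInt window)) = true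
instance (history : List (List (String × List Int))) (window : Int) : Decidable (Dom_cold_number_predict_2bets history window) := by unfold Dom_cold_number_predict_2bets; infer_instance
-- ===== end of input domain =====

-- B replaces A's comparison sort of 1..38 by frequency with a counting-sort: a bucket dict
-- frequency ↦ numbers, concatenated over ascending frequencies ("alternative" objective).

-- ===== PORT A =====
def cold_number_predict_2bets (history : List (List (String × List Int))) (window : Int) : List (List Int) :=
  let recent := PySem.List.slice history (some (-window)) none
  let all_nums := recent.flatMap (fun d => ((PySem.Dict.mk d).get? "numbers").getD [])
  let freq := PySem.Dict.counter all_nums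
  let sorted_cold := PySem.List.sorted (PySem.List.pyRange 1 39 1) (fun x => freq.getD x 0)
  let bet1 := PySem.List.sorted (PySem.List.slice sorted_cold none (some 6)) (fun x => x)
  let bet2 := PySem.List.sorted (PySem.List.slice sorted_cold (some 6) (some 12)) (fun x => x)
  [bet1, bet2]

-- ===== PORT B =====
def cold_number_predict_2bets_alt (history : List (List (String × List Int))) (window : Int) : List (List Int) :=
  let recent := PySem.List.slice history (some (-window)) none
  let freq : PySem.Dict Int Int := recent.foldl (fun fr d =>
      (((PySem.Dict.mk d).get? "numbers").getD []).foldl (fun fr n => fr.modify n 0 (· + 1)) fr)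
    PySem.Dict.empty
  let pairs := (PySem.List.pyRange 1 39 1).map (fun n => (freq.getD n 0, n))
  let buckets : PySem.Dict Int (List Int) :=
    pairs.foldl (fun b p => b.modify p.1 [] (· ++ [p.2])) PySem.Dict.empty
  let cold := (PySem.List.sorted buckets.keys (fun f => f)).flatMap (fun f => buckets.getD f [])
  [PySem.List.sorted (PySem.List.slice cold none (some 6)) (fun x => x),
   PySem.List.sorted (PySem.List.slice cold (some 6) (some 12)) (fun x => x)]

-- ===== PRECONDITION & SPEC =====
-- Pre_: every dict inside the window slice has the key "numbers" (Python A raises KeyError otherwise).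
def Pre_cold_number_predict_2bets (history : List (List (String × List Int))) (window : Int) : Prop :=
  ∀ d ∈ PySem.List.slice history (some (-window)) none, (PySem.Dict.mk d).contains "numbers" = true
instance (history : List (List (String × List Int))) (window : Int) : Decidable (Pre_cold_number_predict_2bets history window) := by unfold Pre_cold_number_predict_2bets; infer_instance
def pvWitness_cold_number_predict_2bets : (List (List (String × List Int))) × Int :=
  ([[("numbers", [3, 7, 3])], [("numbers", [7])]], 50)
def Spec_cold_number_predict_2bets (history : List (List (String × List Int))) (window : Int) (out : List (List Int)) : Prop := out = cold_number_predict_2bets_alt history window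
instance (history : List (List (String × List Int))) (window : Int) (out : List (List Int)) : Decidable (Spec_cold_number_predict_2bets history window out) := by unfold Spec_cold_number_predict_2bets; infer_instance

-- ===== CLAIM (what is proved, stated in full; the proofs are below) =====
def Claim_equal_cold_number_predict_2bets : Prop := ∀ (history : List (List (String × List Int))) (window : Int), Dom_cold_number_predict_2bets history window → Pre_cold_number_predict_2bets history window → Spec_cold_number_predict_2bets history window (cold_number_predict_2bets history window)

-- ===== LEMMAS AND PROOFS =====

-- insertBy passes over a block whose elements are all not-before x
theorem pv_insertBy_skip {α : Type} (bef : α → α → Bool) (x : α) (l1 l2 : List α)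
    (h : ∀ y ∈ l1, bef x y = false) :
    PySem.List.insertBy bef x (l1 ++ l2) = l1 ++ PySem.List.insertBy bef x l2 := by
  induction l1 with
  | nil => simp
  | cons y ys ih =>
    have hy := h y (by simp)
    simp [PySem.List.insertBy, hy]
    exact ih (fun z hz => h z (by simp [hz]))

-- insertBy puts x in front when every element is before-greater
theorem pv_insertBy_front {α : Type} (bef : α → α → Bool) (x : α) (l : List α)
    (h : ∀ y ∈ l, bef x y = true) :
    PySem.List.insertBy bef x l = x :: l := by
  cases l with
  | nil => rfl
  | cons y ys => simp [PySem.List.insertBy, h y (by simp)]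

-- inserting x into a bucket concatenation appends it to its own bucket
theorem pv_insert_flatMap (cnt : Int → Int) (xs : List Int) (x : Int) (fs : List Int)
    (hfs : fs.Pairwise (· < ·)) (hx : cnt x ∈ fs) :
    PySem.List.insertBy (fun a b => decide (cnt a < cnt b)) x
        (fs.flatMap (fun f => xs.filter (fun n => cnt n == f))) =
      fs.flatMap (fun f => xs.filter (fun n => cnt n == f) ++ if cnt x == f then [x] else []) := by
  induction fs with
  | nil => simp at hx
  | cons f fs' ih =>
    have hp := (List.pairwise_cons.mp hfs).1
    have hfs' := (List.pairwise_cons.mp hfs).2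
    by_cases hxf : cnt x = f
    · -- x belongs to the head bucket
      have hskip : ∀ y ∈ xs.filter (fun n => cnt n == f), decide (cnt x < cnt y) = false := by
        intro y hy
        have : cnt y = f := by simpa using (List.mem_filter.mp hy).2
        simp [this, hxf]
      have hfront : ∀ y ∈ fs'.flatMap (fun f => xs.filter (fun n => cnt n == f)),
          decide (cnt x < cnt y) = true := by
        intro y hy
        rcases List.mem_flatMap.mp hy with ⟨g, hg, hyg⟩
        have : cnt y = g := by simpa using (List.mem_filter.mp hyg).2
        have : f < cnt y := this ▸ hp g hg
        simp [hxf, this]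
      have hrest : ∀ g ∈ fs', ¬ (cnt x == g) = true := by
        intro g hg
        have := hp g hg
        simp [hxf]; omega
      rw [List.flatMap_cons, pv_insertBy_skip _ _ _ _ hskip,
        pv_insertBy_front _ _ _ hfront]
      rw [List.flatMap_cons]
      have : (fs'.flatMap (fun f => xs.filter (fun n => cnt n == f) ++ if cnt x == f then [x] else []))
          = fs'.flatMap (fun f => xs.filter (fun n => cnt n == f)) := by
        apply List.flatMap_congr
        intro g hg
        simp [hrest g hg]
      rw [this]
      simp [hxf]
    · -- x belongs to a later bucket
      have hx' : cnt x ∈ fs' := by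
        rcases List.mem_cons.mp hx with h | h
        · exact absurd h hxf
        · exact h
      have hflt : f < cnt x := hp _ hx'
      have hskip : ∀ y ∈ xs.filter (fun n => cnt n == f), decide (cnt x < cnt y) = false := by
        intro y hy
        have : cnt y = f := by simpa using (List.mem_filter.mp hy).2
        simp [this]; omega
      rw [List.flatMap_cons, pv_insertBy_skip _ _ _ _ hskip, ih hfs' hx']
      rw [List.flatMap_cons]
      have : ¬ (cnt x == f) = true := by simp; omega
      simp [this]

-- MAIN: a stable sort by key equals the ascending-bucket concatenation
theorem pv_stable_buckets (cnt : Int → Int) (xs : List Int) (fs : List Int)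
    (hfs : fs.Pairwise (· < ·)) (hall : ∀ n ∈ xs, cnt n ∈ fs) :
    PySem.List.sorted xs cnt =
      fs.flatMap (fun f => xs.filter (fun n => cnt n == f)) := by
  induction xs using List.reverseRecOn with
  | nil => simp [PySem.List.sorted_eq_foldl_insertBy]
  | append_singleton xs x ih =>
    have ih' := ih (fun n hn => hall n (List.mem_append_left _ hn))
    have hx : cnt x ∈ fs := hall x (by simp)
    rw [PySem.List.sorted_eq_foldl_insertBy, List.foldl_append, List.foldl_cons, List.foldl_nil,
      ← PySem.List.sorted_eq_foldl_insertBy, ih', pv_insert_flatMap cnt xs x fs hfs hx]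
    apply List.flatMap_congr
    intro f hf
    simp only [List.filter_append]
    by_cases h : cnt x = f <;> simp [h]

-- B's nested frequency loop builds exactly Counter(all_nums)
theorem pv_freq_eq (recent : List (List (String × List Int))) :
    recent.foldl (fun fr d =>
      (((PySem.Dict.mk d).get? "numbers").getD []).foldl (fun fr n => fr.modify n 0 (· + 1)) fr)
      PySem.Dict.empty
    = PySem.Dict.counter (recent.flatMap (fun d => ((PySem.Dict.mk d).get? "numbers").getD [])) := by
  rw [PySem.Dict.counter_eq_foldl, List.foldl_flatMap]

-- B's bucket pass over the pairs list reproduces A's stable sort of 1..38 by the count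
theorem pv_core (c : Int → Int) (xs : List Int) :
    (PySem.List.sorted ((xs.map (fun n => (c n, n))).foldl
        (fun b p => b.modify p.1 [] (· ++ [p.2])) PySem.Dict.empty).keys (fun f => f)).flatMap
      (fun f => ((xs.map (fun n => (c n, n))).foldl
        (fun b p => b.modify p.1 [] (· ++ [p.2])) PySem.Dict.empty).getD f [])
    = PySem.List.sorted xs c := by
  have hkeys : ((xs.map (fun n => (c n, n))).foldl
      (fun b p => b.modify p.1 [] (· ++ [p.2])) PySem.Dict.empty).keys
      = PySem.Set.ofList (xs.map c) := by
    rw [PySem.Dict.keys_foldl_modify_key (xs.map (fun n => (c n, n)))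
      (fun (p : Int × Int) => p.1) ([] : List Int)
      (fun (_ : PySem.Dict Int (List Int)) (p : Int × Int) => (· ++ [p.2]))]
    simp [PySem.Set.update, PySem.Set.ofList, List.map_map, Function.comp_def]
  have hbuck : ∀ f, ((xs.map (fun n => (c n, n))).foldl
      (fun b p => b.modify p.1 [] (· ++ [p.2])) PySem.Dict.empty).getD f []
      = xs.filter (fun n => c n == f) := by
    intro f
    rw [PySem.Dict.getD_foldl_modify_append]
    simp [List.filter_map, Function.comp_def]
  rw [hkeys,
    pv_stable_buckets c xs _ (PySem.List.sorted_ofList_pairwise_lt _)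
      (fun n hn => by
        rw [PySem.List.mem_sorted, PySem.Set.mem_ofList]
        exact List.mem_map_of_mem hn)]
  apply List.flatMap_congr
  intro f hf
  exact hbuck f

theorem cold_eq (history : List (List (String × List Int))) (window : Int) :
    cold_number_predict_2bets history window = cold_number_predict_2bets_alt history window := by
  simp only [cold_number_predict_2bets, cold_number_predict_2bets_alt, pv_freq_eq, pv_core]

-- ===== VERDICT (by name: the statement is the Claim_ definition above) =====
theorem cold_number_predict_2bets_spec : Claim_equal_cold_number_predict_2bets := by
  intro history window _ _
  unfold Spec_cold_number_predict_2bets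
  exact cold_eq history window
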